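-- pv_equiv track=rewrite | github.com/goodwordalchemy/coding_competitions | kickstartH2021/painter.py | solution
-- ===== SOURCE A (Python) =====
-- color_mapping = {
--     "U": set(),
--     "R": set("R"),
--     "Y": set("Y"),
--     "B": set("B"),
--     "O": set("RY"),
--     "P": set("RB"),
--     "G": set("YB"),
--     "A": set("RYB"),
-- }
--
-- def solution(P):
--     cells = [color_mapping[elt] for elt in P]
--
--     total_strokes = 0
--     for primary_color in "RYB":
--         in_stroke = False
--         for c in cells:
--             if primary_color in c:
--                 in_stroke = True
--             else:
--                 total_strokes += in_stroke
--                 in_stroke = False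
--         total_strokes += in_stroke
--
--     return total_strokes
-- ===== SOURCE B (Python) =====
-- color_mapping = {
--     "U": set(),
--     "R": set("R"),
--     "Y": set("Y"),
--     "B": set("B"),
--     "O": set("RY"),
--     "P": set("RB"),
--     "G": set("YB"),
--     "A": set("RYB"),
-- }
--
-- def solution(P):
--     total = 0
--     prev = set()
--     for elt in P:
--         cell = color_mapping[elt]
--         total += len(cell - prev)
--         prev = cell
--     return total
-- ===== Notes on version B (the rewrite author's own statement) =====
-- stated objective: alternative
-- what changed: Replaces three per-primary passes with an in_stroke flag by one pass that adds, per cell, the number of primaries newly appearing relative to the previous cell (rising edges).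
import Mathlib
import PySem

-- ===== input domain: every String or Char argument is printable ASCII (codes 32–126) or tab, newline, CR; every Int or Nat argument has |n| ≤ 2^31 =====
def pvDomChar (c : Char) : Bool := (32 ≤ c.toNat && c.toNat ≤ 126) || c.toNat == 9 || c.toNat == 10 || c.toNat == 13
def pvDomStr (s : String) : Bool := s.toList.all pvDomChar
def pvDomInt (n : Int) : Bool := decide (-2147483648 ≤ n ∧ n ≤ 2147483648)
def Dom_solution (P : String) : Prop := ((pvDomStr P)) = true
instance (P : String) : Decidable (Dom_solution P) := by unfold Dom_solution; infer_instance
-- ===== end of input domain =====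

-- B changes the decomposition (one adjacent-set-difference pass instead of three per-primary flag scans); equivalence on strings over the paint alphabet.

-- ===== PORT A =====
-- color_mapping[c] : the set of primary colors of a paint character (none = KeyError)
def colorMap (c : Char) : Option (List Char) :=
  if c = 'U' then some []
  else if c = 'R' then some ['R']
  else if c = 'Y' then some ['Y']
  else if c = 'B' then some ['B']
  else if c = 'O' then some ['R', 'Y']
  else if c = 'P' then some ['R', 'B']
  else if c = 'G' then some ['Y', 'B']
  else if c = 'A' then some ['R', 'Y', 'B']
  else none

def solution (P : String) : Int :=
  let cells := P.toList.map (fun c => (colorMap c).getD [])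
  ['R', 'Y', 'B'].foldl (fun total p =>
    let st := cells.foldl (fun (st : Int × Bool) c =>
      if p ∈ c then (st.1, true) else (st.1 + (if st.2 then 1 else 0), false)) (total, false)
    st.1 + (if st.2 then 1 else 0)) 0

-- ===== PORT B =====
def solution_alt (P : String) : Int :=
  (P.toList.foldl (fun (st : Int × List Char) c =>
    let cell := (colorMap c).getD []
    (st.1 + ((cell.filter (fun p => p ∉ st.2)).length : Int), cell)) (0, [])).1

-- ===== PRECONDITION & SPEC =====
-- Pre_ excludes exactly the characters outside color_mapping's keys, on which A raises KeyError.
def Pre_solution (P : String) : Prop :=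
  (P.toList.all (fun c => c ∈ ['U', 'R', 'Y', 'B', 'O', 'P', 'G', 'A'])) = true
instance (P : String) : Decidable (Pre_solution P) := by unfold Pre_solution; infer_instance
def pvWitness_solution : String := "AU"

def Spec_solution (P : String) (out : Int) : Prop := out = solution_alt P
instance (P : String) (out : Int) : Decidable (Spec_solution P out) := by unfold Spec_solution; infer_instance

-- ===== CLAIM (what is proved, stated in full; the proofs are below) =====
def Claim_equal_solution : Prop := ∀ (P : String), Dom_solution P → Pre_solution P → Spec_solution P (solution P)

-- ===== LEMMAS AND PROOFS =====

-- rising-edge count of primary p over the char stream, b = "p was in the previous cell"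
def edges (p : Char) (b : Bool) : List Char → Int
  | [] => 0
  | c :: cs =>
    let cell := (colorMap c).getD []
    (if p ∈ cell ∧ b = false then 1 else 0) + edges p (decide (p ∈ cell)) cs

theorem lemA (p : Char) (cs : List Char) : ∀ (t : Int) (b : Bool),
    (let st := cs.foldl (fun (st : Int × Bool) c =>
        let cell := (colorMap c).getD []
        if p ∈ cell then (st.1, true) else (st.1 + (if st.2 then 1 else 0), false)) (t, b)
     st.1 + (if st.2 then 1 else 0)) = t + edges p b cs + (if b then 1 else 0) := by
  induction cs with
  | nil => intro t b; simp [edges]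
  | cons c cs ih =>
    intro t b
    simp only [List.foldl_cons, edges]
    by_cases h : p ∈ (colorMap c).getD []
    · simp only [h, if_pos, ih]
      cases b <;> simp <;> ring
    · simp only [h, if_neg, ih, not_false_iff]
      cases b <;> simp <;> ring

theorem lemB (cs : List Char) : ∀ (t : Int) (prev : List Char),
    (∀ c ∈ cs, c ∈ ['U', 'R', 'Y', 'B', 'O', 'P', 'G', 'A']) →
    (cs.foldl (fun (st : Int × List Char) c =>
        let cell := (colorMap c).getD []
        (st.1 + ((cell.filter (fun p => p ∉ st.2)).length : Int), cell)) (t, prev)).1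
      = t + edges 'R' (decide ('R' ∈ prev)) cs + edges 'Y' (decide ('Y' ∈ prev)) cs
          + edges 'B' (decide ('B' ∈ prev)) cs := by
  induction cs with
  | nil => intro t prev _; simp [edges]
  | cons c cs ih =>
    intro t prev hv
    have hc := hv c (List.mem_cons_self ..)
    have hcs : ∀ c' ∈ cs, c' ∈ ['U', 'R', 'Y', 'B', 'O', 'P', 'G', 'A'] :=
      fun c' h => hv c' (List.mem_cons_of_mem _ h)
    simp only [List.foldl_cons, edges]
    rw [ih _ _ hcs]
    fin_cases hc <;>
      simp only [colorMap, if_pos, if_neg, reduceIte, Option.getD_some] <;>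
      by_cases hR : 'R' ∈ prev <;> by_cases hY : 'Y' ∈ prev <;> by_cases hB : 'B' ∈ prev <;>
      simp [hR, hY, hB] <;> ring

-- ===== VERDICT (by name: the statement is the Claim_ definition above) =====
theorem solution_spec : Claim_equal_solution := by
  intro P _ hpre
  unfold Spec_solution solution solution_alt
  simp only [List.foldl_map, List.foldl_cons, List.foldl_nil]
  have hpre' : ∀ c ∈ P.toList, c ∈ ['U', 'R', 'Y', 'B', 'O', 'P', 'G', 'A'] := by
    simpa [Pre_solution, List.all_eq_true] using hpre
  rw [lemB P.toList 0 [] hpre']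
  have hR := lemA 'R' P.toList
  have hY := lemA 'Y' P.toList
  have hB := lemA 'B' P.toList
  simp only at hR hY hB
  rw [hR 0 false, hY _ false, hB _ false]
  simp
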